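-- pv_equiv track=rewrite | github.com/shanawazbaig/lst-assignment | booolean.py | parse_cube
-- ===== SOURCE A (Python) =====
-- from typing import Dict, Iterable, List, Optional, Sequence, Set, Tuple, FrozenSet
--
-- def normalize_var(token: str) -> Tuple[str, bool]:
--     """Normalize a literal token into (name, polarity) without forcing lowercase.
--
--     CHANGED BEHAVIOUR:
--       - Previously: Uppercase variable without prime meant complemented lowercase (A == a').
--       - Now:       Case is preserved and significant. A and a are distinct symbols.
--                    Complement is indicated ONLY by a trailing prime (').
--
--     Examples:
--         a   -> ("a", True)
--         a'  -> ("a", False)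
--         A   -> ("A", True)
--         A'  -> ("A", False)
--         X2' -> ("X2", False)
--     """
--     t = token.strip()
--     if not t:
--         raise ValueError("Empty token")
--     prime = t.endswith("'")
--     base = t.rstrip("'")
--     if not base:
--         raise ValueError(f"Bad literal: {token}")
--     # Keep case & digits exactly (case-sensitive variable universe)
--     return base, (not prime)
--
-- def parse_cube(expr: str) -> Dict[str, bool]:
--     """
--     Parse a cube like "ab'c" into an assignment dict { 'a':True, 'b':False, 'c':True }.
--     """
--     expr = expr.strip().replace(" ", "")
--     if expr in ("", "1"):
--         return {}
--     if expr == "0":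
--         # Impossible assignment; we represent as empty assignment + a flag at call sites.
--         return {"__IMPOSSIBLE__": True}
--     assign: Dict[str, bool] = {}
--     i = 0
--     while i < len(expr):
--         ch = expr[i]
--         if not ch.isalpha():
--             raise ValueError(f"Bad character '{ch}' in cube '{expr}'")
--         j = i + 1
--         while j < len(expr) and expr[j].isdigit():
--             j += 1
--         prime = False
--         if j < len(expr) and expr[j] == "'":
--             prime = True
--             j += 1
--         token = expr[i:j]
--         v, pol = normalize_var(token + ("'" if prime else ""))
--         if v in assign and assign[v] != pol:
--             # Contradictory cube -> unsatisfiable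
--             return {"__IMPOSSIBLE__": True}
--         assign[v] = pol
--         i = j
--     return assign
-- ===== SOURCE B (Python) =====
-- def parse_cube(expr: str):
--     """
--     Parse a cube like "ab'c" into an assignment dict { 'a':True, 'b':False, 'c':True }.
--     Staged: cut the string at every letter, slice into tokens, validate the slices,
--     then a global (setdefault + any) consistency check instead of an incremental one.
--     """
--     expr = expr.strip().replace(" ", "")
--     if expr in ("", "1"):
--         return {}
--     if expr == "0":
--         return {"__IMPOSSIBLE__": True}
--     # Stage 1: every literal starts at a letter; cut there and slice.
--     cuts = [i for i, c in enumerate(expr) if c.isalpha()]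
--     if not cuts or cuts[0] != 0:
--         raise ValueError(f"Bad character '{expr[0]}' in cube '{expr}'")
--     tokens = [expr[a:b] for a, b in zip(cuts, cuts[1:] + [len(expr)])]
--     # Stage 2: validate each slice's shape (letter, digits, optional final prime).
--     for t in tokens:
--         bad = _bad_char(t)
--         if bad is not None:
--             raise ValueError(f"Bad character '{bad}' in cube '{expr}'")
--     # Stage 3: literals, first-occurrence polarities, one global consistency check.
--     lits = [(t.rstrip("'"), not t.endswith("'")) for t in tokens]
--     seen = {}
--     for b, p in lits:
--         seen.setdefault(b, p)
--     if any(seen[b] != p for b, p in lits):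
--         return {"__IMPOSSIBLE__": True}
--     return seen
--
--
-- def _bad_char(t):
--     rest = t[1:].lstrip("0123456789")
--     if not rest:
--         return None
--     if rest[0] == "'":
--         return rest[1] if len(rest) > 1 else None
--     return rest[0]
-- ===== Notes on version B (the rewrite author's own statement) =====
-- stated objective: alternative
-- what changed: A's single incremental index/while scanner (tokenize + dict-build + per-step contradiction check in one loop) is replaced by staged passes: cut the string at every letter position and slice into tokens, validate the slices, then derive the assignment by a setdefault grouping pass plus one global consistency check instead of an incremental early-return check.
-- outside the precondition, e.g. on parse_cube("aa'@"): A returns {'__IMPOSSIBLE__': True}, B raises ValueError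
import Mathlib
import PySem

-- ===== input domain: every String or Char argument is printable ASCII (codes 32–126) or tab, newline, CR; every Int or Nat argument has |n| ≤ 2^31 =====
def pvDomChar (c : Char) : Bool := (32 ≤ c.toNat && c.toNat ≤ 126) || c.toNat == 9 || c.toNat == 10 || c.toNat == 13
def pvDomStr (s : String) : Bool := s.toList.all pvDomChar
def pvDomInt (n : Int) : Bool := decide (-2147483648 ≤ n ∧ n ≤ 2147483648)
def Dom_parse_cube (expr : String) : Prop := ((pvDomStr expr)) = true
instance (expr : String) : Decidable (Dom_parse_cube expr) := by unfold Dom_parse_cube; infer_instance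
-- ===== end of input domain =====

-- B replaces A's single incremental index/while scanner by staged passes: cut the cleaned string at every
-- letter position and slice it into tokens, validate the slices, then build the assignment by a setdefault
-- grouping pass plus ONE global consistency check instead of A's per-step contradiction check (alternative
-- decomposition, same asymptotic cost); same return values on Pre_.

-- ===== PORT A =====

-- port of normalize_var (on code points; ValueError = none); t.rstrip("'") ported as
-- reverse/dropWhile/reverse, exact for a single strip set
def pcNormalize (token : List Char) : Option (List Char × Bool) :=
  let t := PySem.Chars.strip token
  if t = [] then none
  else
    let prime := PySem.Chars.endswith t ['\'']
    let base := (t.reverse.dropWhile (fun x => x = '\'')).reverse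
    if base = [] then none
    else some (base, !prime)

-- the while-loop over i: structural recursion on the unread suffix; inner digit while = takeWhile/dropWhile
def pcScan (cs : List Char) (assign : PySem.Dict String Bool) : Option (PySem.Dict String Bool) :=
  match cs with
  | [] => some assign
  | ch :: rest =>
    if PySem.Chars.isalpha ch = true then
      let ds := rest.takeWhile PySem.Chars.isdigit
      let r1 := rest.dropWhile PySem.Chars.isdigit
      let prime : Bool := r1.head? = some '\''
      let r2 := if prime then r1.tail else r1
      let token := (ch :: ds) ++ (if prime then ['\''] else [])
      match pcNormalize (token ++ (if prime then ['\''] else [])) with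
      | none => none     -- normalize_var raised
      | some (b, pol) =>
        let v := String.ofList b
        if assign.contains v && !(assign.get? v == some pol) then
          some (PySem.Dict.empty.insert "__IMPOSSIBLE__" true)
        else pcScan r2 (assign.insert v pol)
    else none            -- ValueError: bad character
termination_by cs.length
decreasing_by
  have h1 := List.length_dropWhile_le (p := PySem.Chars.isdigit) (l := rest)
  have h2 : (rest.dropWhile PySem.Chars.isdigit).tail.length ≤ (rest.dropWhile PySem.Chars.isdigit).length := by
    simp [List.length_tail]
  simp only [List.length_cons]
  split <;> omega

def parse_cube (expr : String) : List (String × Bool) :=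
  let e := PySem.Chars.replace (PySem.Chars.strip expr.toList) [' '] []
  if e = [] ∨ e = ['1'] then []
  else if e = ['0'] then [("__IMPOSSIBLE__", true)]
  else
    match pcScan e PySem.Dict.empty with
    | some d => d.items
    | none => []         -- ValueError: excluded by Pre_

-- ===== PORT B =====

-- cuts = [i for i, c in enumerate(expr) if c.isalpha()]
def pbCuts (e : List Char) : List Int :=
  ((PySem.List.enumerate e 0).filter (fun p => PySem.Chars.isalpha p.2)).map (·.1)

-- tokens = [expr[a:b] for a, b in zip(cuts, cuts[1:] + [len(expr)])]
def pbTokens (e : List Char) : List (List Char) :=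
  ((pbCuts e).zip ((pbCuts e).tail ++ [(e.length : Int)])).map
    (fun ab => PySem.List.slice e (some ab.1) (some ab.2))

-- _bad_char; t[1:].lstrip("0123456789") ported as dropWhile isdigit (that strip set IS the digits)
def pbBadChar (t : List Char) : Option Char :=
  match (t.drop 1).dropWhile PySem.Chars.isdigit with
  | [] => none
  | c :: r => if c = '\'' then r.head? else some c

-- (t.rstrip("'"), not t.endswith("'")); rstrip("'") ported as reverse/dropWhile/reverse (one strip char)
def pbLit (t : List Char) : String × Bool :=
  (String.ofList ((t.reverse.dropWhile (fun x => x = '\'')).reverse),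
   !(PySem.Chars.endswith t ['\'']))

-- the setdefault grouping loop
def pbSeen (lits : List (String × Bool)) : PySem.Dict String Bool :=
  lits.foldl (fun d bp => d.setdefault bp.1 bp.2) PySem.Dict.empty

def parse_cube_alt (expr : String) : List (String × Bool) :=
  let e := PySem.Chars.replace (PySem.Chars.strip expr.toList) [' '] []
  if e = [] ∨ e = ['1'] then []
  else if e = ['0'] then [("__IMPOSSIBLE__", true)]
  else
    if (pbCuts e).head? ≠ some 0 then []    -- ValueError (no letters / bad leading char): excluded by Pre_
    else if (pbTokens e).any (fun t => (pbBadChar t).isSome) then []  -- ValueError: excluded by Pre_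
    else
      let lits := (pbTokens e).map pbLit
      let seen := pbSeen lits
      if lits.any (fun bp => !(seen.get? bp.1 == some bp.2)) then
        [("__IMPOSSIBLE__", true)]
      else seen.items

-- ===== PRECONDITION & SPEC =====

-- Pre_ excludes the inputs on which A raises ValueError (a character that is not part of a well-formed
-- literal token); it also excludes strings where a contradictory pair of literals precedes such a bad
-- character — there A short-circuits to the IMPOSSIBLE flag without ever seeing the bad character while B
-- (which validates the whole string) raises, an error-path ordering accident nobody would specify.
-- Closed form: the cleaned string is empty, a constant cube, or a sequence of literals [A-Za-z]\d*'?,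
-- characterised by per-character classes, a leading letter, and an adjacency (zip-pairs) condition.
def Pre_parse_cube (expr : String) : Prop :=
  let e := PySem.Chars.replace (PySem.Chars.strip expr.toList) [' '] []
  e = [] ∨ e = ['1'] ∨ e = ['0'] ∨
    (e.all (fun c => PySem.Chars.isalpha c || PySem.Chars.isdigit c || c == '\'') = true ∧
     (e.take 1).all (fun c => PySem.Chars.isalpha c) = true ∧
     -- every digit or prime directly follows a letter or a digit (the regex-language condition)
     (e.zip e.tail).all (fun p => !(PySem.Chars.isdigit p.2 || p.2 == '\'') ||
        (PySem.Chars.isalpha p.1 || PySem.Chars.isdigit p.1)) = true)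
instance (expr : String) : Decidable (Pre_parse_cube expr) := by unfold Pre_parse_cube; infer_instance

def pvWitness_parse_cube : String := "b'"

def Spec_parse_cube (expr : String) (out : List (String × Bool)) : Prop := out = parse_cube_alt expr
instance (expr : String) (out : List (String × Bool)) : Decidable (Spec_parse_cube expr out) := by unfold Spec_parse_cube; infer_instance

-- ===== CLAIM (what is proved, stated in full; the proofs are below) =====
def Claim_equal_parse_cube : Prop := ∀ (expr : String), Dom_parse_cube expr → Pre_parse_cube expr → Spec_parse_cube expr (parse_cube expr)

-- ===== LEMMAS AND PROOFS =====

-- character-class kit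

theorem alpha_bounds (c : Char) (h : PySem.Chars.isalpha c = true) :
    33 ≤ c.toNat ∧ c.toNat ≤ 126 ∧ c.toNat ≠ 39 := by
  simp only [PySem.Chars.isalpha, PySem.Chars.isupper, PySem.Chars.islower, Char.le_def,
    UInt32.le_iff_toNat_le, Bool.or_eq_true, Bool.and_eq_true, decide_eq_true_eq] at h
  have hA : ('A' : Char).val.toNat = 65 := rfl
  have hZ : ('Z' : Char).val.toNat = 90 := rfl
  have ha : ('a' : Char).val.toNat = 97 := rfl
  have hz : ('z' : Char).val.toNat = 122 := rfl
  simp only [Char.toNat] at h ⊢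
  rcases h with ⟨h1, h2⟩ | ⟨h1, h2⟩ <;> omega

theorem digit_bounds (c : Char) (h : PySem.Chars.isdigit c = true) :
    48 ≤ c.toNat ∧ c.toNat ≤ 57 := by
  simp only [PySem.Chars.isdigit, Char.le_def, UInt32.le_iff_toNat_le, Bool.and_eq_true,
    decide_eq_true_eq] at h
  have h0 : ('0' : Char).val.toNat = 48 := rfl
  have h9 : ('9' : Char).val.toNat = 57 := rfl
  simp only [Char.toNat] at h ⊢
  omega

theorem isspace_false (c : Char) (h : 33 ≤ c.toNat ∧ c.toNat ≤ 126) :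
    PySem.Chars.isspace c = false := by
  simp only [PySem.Chars.isspace, Bool.or_eq_false_iff, Bool.and_eq_false_iff,
    decide_eq_false_iff_not]
  omega

theorem ne_prime_of_toNat (c : Char) (h : c.toNat ≠ 39) : c ≠ '\'' := by
  intro hc; subst hc; simp [Char.toNat] at h

theorem alpha_not_digit (c : Char) (h : PySem.Chars.isalpha c = true) :
    PySem.Chars.isdigit c = false := by
  simp only [PySem.Chars.isalpha, PySem.Chars.isupper, PySem.Chars.islower, Char.le_def,
    UInt32.le_iff_toNat_le, Bool.or_eq_true, Bool.and_eq_true, decide_eq_true_eq] at h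
  simp only [PySem.Chars.isdigit, Char.le_def, UInt32.le_iff_toNat_le, Bool.and_eq_false_iff,
    decide_eq_false_iff_not]
  have hA : ('A' : Char).val.toNat = 65 := rfl
  have h9 : ('9' : Char).val.toNat = 57 := rfl
  have ha : ('a' : Char).val.toNat = 97 := rfl
  have h0 : ('0' : Char).val.toNat = 48 := rfl
  have hZ : ('Z' : Char).val.toNat = 90 := rfl
  have hz : ('z' : Char).val.toNat = 122 := rfl
  rcases h with ⟨h1, h2⟩ | ⟨h1, h2⟩ <;> right <;> omega

theorem digit_not_alpha (c : Char) (h : PySem.Chars.isdigit c = true) :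
    PySem.Chars.isalpha c = false := by
  by_cases ha : PySem.Chars.isalpha c = true
  · exact absurd h (by simp [alpha_not_digit c ha])
  · simpa using ha

theorem alpha_ne_prime (c : Char) (h : PySem.Chars.isalpha c = true) : c ≠ '\'' :=
  ne_prime_of_toNat c (alpha_bounds c h).2.2

theorem prime_not_digit : PySem.Chars.isdigit '\'' = false := by decide

theorem prime_not_alpha : PySem.Chars.isalpha '\'' = false := by decide

theorem isspace_prime : PySem.Chars.isspace '\'' = false := by decide

-- takeWhile/dropWhile kit

theorem dropWhile_eq_self_of_all (p : Char → Bool) (cs : List Char)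
    (h : ∀ c ∈ cs, p c = false) : cs.dropWhile p = cs := by
  cases cs with
  | nil => rfl
  | cons c t => simp [h c (by simp)]

theorem dropWhile_all_append (p : Char → Bool) (l m : List Char)
    (h : ∀ a ∈ l, p a = true) : (l ++ m).dropWhile p = m.dropWhile p := by
  induction l with
  | nil => rfl
  | cons a t ih =>
      simp only [List.cons_append, List.dropWhile_cons, h a (by simp)]
      exact ih (fun a ha => h a (by simp [ha]))

theorem takeWhile_all_append (p : Char → Bool) (l m : List Char)
    (h : ∀ a ∈ l, p a = true) : (l ++ m).takeWhile p = l ++ m.takeWhile p := by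
  induction l with
  | nil => rfl
  | cons a t ih =>
      simp only [List.cons_append, List.takeWhile_cons, h a (by simp)]
      simp [ih (fun a ha => h a (by simp [ha]))]

theorem strip_eq_self_of_all (cs : List Char)
    (h : ∀ c ∈ cs, PySem.Chars.isspace c = false) : PySem.Chars.strip cs = cs := by
  unfold PySem.Chars.strip PySem.Chars.lstrip PySem.Chars.rstrip
  rw [dropWhile_eq_self_of_all _ _ h]
  rw [dropWhile_eq_self_of_all _ _ (by intro c hc; exact h c (List.mem_reverse.mp hc))]
  simp

-- `(ds ++ m).takeWhile isdigit = ds` and the matching dropWhile, for a digit block followed by a non-digit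
theorem tw_dw_token (ds m : List Char) (hds : ∀ d ∈ ds, PySem.Chars.isdigit d = true)
    (hm : ∀ x ∈ m.head?, PySem.Chars.isdigit x = false) :
    (ds ++ m).takeWhile PySem.Chars.isdigit = ds ∧
    (ds ++ m).dropWhile PySem.Chars.isdigit = m := by
  constructor
  · rw [takeWhile_all_append _ _ _ hds]
    cases m with
    | nil => simp
    | cons x t => simp [hm x (by simp)]
  · rw [dropWhile_all_append _ _ _ hds]
    cases m with
    | nil => rfl
    | cons x t => simp [hm x (by simp)]

-- token-shape kit (a token is c :: ds, optionally followed by primes)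

theorem tok_not_prime (c : Char) (ds : List Char) (hc : PySem.Chars.isalpha c = true)
    (hds : ∀ d ∈ ds, PySem.Chars.isdigit d = true) :
    ∀ x ∈ c :: ds, (decide (x = '\'')) = false := by
  intro x hx
  rcases List.mem_cons.mp hx with rfl | hx
  · simpa using alpha_ne_prime x hc
  · simpa using ne_prime_of_toNat x (by have := digit_bounds x (hds x hx); omega)

theorem droprev_tok (c : Char) (ds : List Char) (hc : PySem.Chars.isalpha c = true)
    (hds : ∀ d ∈ ds, PySem.Chars.isdigit d = true) :
    ((c :: ds).reverse.dropWhile (fun x => decide (x = '\''))).reverse = c :: ds := by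
  rw [dropWhile_eq_self_of_all _ _ (by intro x hx; exact tok_not_prime c ds hc hds x (List.mem_reverse.mp hx))]
  simp

theorem droprev_tok_primes (c : Char) (ds ks : List Char) (hc : PySem.Chars.isalpha c = true)
    (hds : ∀ d ∈ ds, PySem.Chars.isdigit d = true) (hks : ∀ k ∈ ks, k = '\'') :
    (((c :: ds) ++ ks).reverse.dropWhile (fun x => decide (x = '\''))).reverse = c :: ds := by
  rw [List.reverse_append]
  rw [dropWhile_all_append _ _ _ (by intro a ha; simp [hks a (List.mem_reverse.mp ha)])]
  rw [dropWhile_eq_self_of_all _ _ (by intro x hx; exact tok_not_prime c ds hc hds x (List.mem_reverse.mp hx))]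
  simp

theorem endswith_snoc (xs : List Char) : PySem.Chars.endswith (xs ++ ['\'']) ['\''] = true := by
  rw [PySem.Chars.endswith_iff]; exact List.suffix_append xs ['\'']

theorem endswith_tok_false (c : Char) (ds : List Char) (hc : PySem.Chars.isalpha c = true)
    (hds : ∀ d ∈ ds, PySem.Chars.isdigit d = true) :
    PySem.Chars.endswith (c :: ds) ['\''] = false := by
  rw [Bool.eq_false_iff]
  intro h
  rw [PySem.Chars.endswith_iff] at h
  have : '\'' ∈ c :: ds := h.mem (by simp)
  have := tok_not_prime c ds hc hds '\'' this
  simp at this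

theorem endswith_tok_prime (c : Char) (ds : List Char) :
    PySem.Chars.endswith (c :: (ds ++ ['\''])) ['\''] = true := by
  have := endswith_snoc (c :: ds)
  simpa using this

theorem droprev_tok_prime (c : Char) (ds : List Char) (hc : PySem.Chars.isalpha c = true)
    (hds : ∀ d ∈ ds, PySem.Chars.isdigit d = true) :
    ((c :: (ds ++ ['\''])).reverse.dropWhile (fun x => decide (x = '\''))).reverse = c :: ds := by
  have := droprev_tok_primes c ds ['\''] hc hds (by simp)
  simpa using this

theorem strip_tok (c : Char) (ds ks : List Char) (hc : PySem.Chars.isalpha c = true)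
    (hds : ∀ d ∈ ds, PySem.Chars.isdigit d = true) (hks : ∀ k ∈ ks, k = '\'') :
    PySem.Chars.strip (c :: (ds ++ ks)) = c :: (ds ++ ks) := by
  apply strip_eq_self_of_all
  intro x hx
  rcases List.mem_cons.mp hx with rfl | hx
  · exact isspace_false x ⟨(alpha_bounds x hc).1, (alpha_bounds x hc).2.1⟩
  · rcases List.mem_append.mp hx with hx | hx
    · exact isspace_false x (by have := digit_bounds x (hds x hx); omega)
    · rw [hks x hx]; exact isspace_prime

theorem pcNormalize_noprime (c : Char) (ds : List Char) (hc : PySem.Chars.isalpha c = true)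
    (hds : ∀ d ∈ ds, PySem.Chars.isdigit d = true) :
    pcNormalize (c :: ds) = some (c :: ds, true) := by
  unfold pcNormalize
  have h0 : PySem.Chars.strip (c :: ds) = c :: ds := by
    have := strip_tok c ds [] hc hds (by simp)
    simpa using this
  rw [h0]
  simp only [reduceCtorEq, if_false]
  rw [endswith_tok_false c ds hc hds]
  have h1 := droprev_tok c ds hc hds
  simp only [h1]
  simp

theorem pcNormalize_prime (c : Char) (ds : List Char) (hc : PySem.Chars.isalpha c = true)
    (hds : ∀ d ∈ ds, PySem.Chars.isdigit d = true) :
    pcNormalize (c :: (ds ++ ['\'', '\''])) = some (c :: ds, false) := by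
  unfold pcNormalize
  rw [strip_tok c ds ['\'', '\''] hc hds (by intro k hk; fin_cases hk <;> rfl)]
  simp only [reduceCtorEq, if_false]
  have he : PySem.Chars.endswith (c :: (ds ++ ['\'', '\''])) ['\''] = true := by
    have := endswith_snoc (c :: (ds ++ ['\'']))
    simpa using this
  rw [he]
  have h1 := droprev_tok_primes c ds ['\'', '\''] hc hds (by intro k hk; fin_cases hk <;> rfl)
  simp only [List.cons_append] at h1
  simp only [h1]
  simp

-- well-formed cube strings: a sequence of literals letter ++ digits ++ optional prime

inductive CubeWF : List Char → Prop
  | nil : CubeWF []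
  | tok (c : Char) (ds po rest : List Char)
      (hc : PySem.Chars.isalpha c = true)
      (hds : ∀ d ∈ ds, PySem.Chars.isdigit d = true)
      (hpo : po = [] ∨ po = ['\''])
      (hrest : CubeWF rest) :
      CubeWF (c :: (ds ++ (po ++ rest)))

theorem wf_head (e : List Char) (h : CubeWF e) :
    e = [] ∨ ∃ c u, e = c :: u ∧ PySem.Chars.isalpha c = true := by
  cases h with
  | nil => exact Or.inl rfl
  | tok c ds po rest hc hds hpo hrest => exact Or.inr ⟨c, _, rfl, hc⟩

theorem po_rest_head (po rest : List Char) (hpo : po = [] ∨ po = ['\''])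
    (hrest : CubeWF rest) :
    ∀ x ∈ (po ++ rest).head?, PySem.Chars.isdigit x = false := by
  rcases hpo with rfl | rfl
  · rcases wf_head rest hrest with rfl | ⟨c', u, rfl, hc'⟩
    · simp
    · intro x hx
      simp only [List.nil_append, List.head?_cons, Option.mem_def, Option.some.injEq] at hx
      subst hx
      exact alpha_not_digit _ hc'
  · intro x hx
    simp only [List.cons_append, List.head?_cons, Option.mem_def, Option.some.injEq] at hx
    subst hx
    exact prime_not_digit

-- the greedy token list (proof-side canonical tokenization)
def gtoks : List Char → List (List Char)
  | [] => []
  | c :: rest =>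
    if (rest.dropWhile PySem.Chars.isdigit).head? = some '\'' then
      ((c :: rest.takeWhile PySem.Chars.isdigit) ++ ['\'']) ::
        gtoks (rest.dropWhile PySem.Chars.isdigit).tail
    else
      (c :: rest.takeWhile PySem.Chars.isdigit) :: gtoks (rest.dropWhile PySem.Chars.isdigit)
termination_by cs => cs.length
decreasing_by
  · have h1 := List.length_dropWhile_le (p := PySem.Chars.isdigit) (l := rest)
    have h2 : (rest.dropWhile PySem.Chars.isdigit).tail.length ≤ (rest.dropWhile PySem.Chars.isdigit).length := by
      simp [List.length_tail]
    simp only [List.length_cons]; omega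
  · have h1 := List.length_dropWhile_le (p := PySem.Chars.isdigit) (l := rest)
    simp only [List.length_cons]; omega

theorem gtoks_step (c : Char) (ds po rest : List Char)
    (hds : ∀ d ∈ ds, PySem.Chars.isdigit d = true)
    (hpo : po = [] ∨ po = ['\''])
    (hrest : CubeWF rest) :
    gtoks (c :: (ds ++ (po ++ rest))) = (c :: (ds ++ po)) :: gtoks rest := by
  obtain ⟨htw, hdw⟩ := tw_dw_token ds (po ++ rest) hds (po_rest_head po rest hpo hrest)
  rw [gtoks.eq_def]
  dsimp only
  rcases hpo with rfl | rfl
  · have hne : ¬ ((ds ++ ([] ++ rest)).dropWhile PySem.Chars.isdigit).head? = some '\'' := by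
      rw [hdw]
      rcases wf_head rest hrest with rfl | ⟨c', u, rfl, hc'⟩
      · simp
      · simp [alpha_ne_prime c' hc']
    rw [if_neg hne, htw, hdw]
    simp
  · simp only [List.cons_append, List.nil_append] at htw hdw
    simp [htw, hdw]

-- the Pre_ shape conditions imply well-formedness
theorem pre_wf (e : List Char)
    (h1 : ∀ c ∈ e, (PySem.Chars.isalpha c || PySem.Chars.isdigit c || c == '\'') = true)
    (h2 : ∀ c ∈ e.head?, PySem.Chars.isalpha c = true)
    (h3 : List.IsChain (fun a b => (PySem.Chars.isdigit b || b == '\'') = true →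
            (PySem.Chars.isalpha a || PySem.Chars.isdigit a) = true) e) : CubeWF e := by
  generalize hn : e.length = n
  induction n using Nat.strong_induction_on generalizing e with
  | _ n ih =>
  match e, h1, h2, h3 with
  | [], _, _, _ => exact CubeWF.nil
  | c :: t, h1, h2, h3 =>
    have hc : PySem.Chars.isalpha c = true := h2 c (by simp)
    have hds : ∀ d ∈ t.takeWhile PySem.Chars.isdigit, PySem.Chars.isdigit d = true :=
      fun d hd => List.mem_takeWhile_imp hd
    have hsuffe : t.dropWhile PySem.Chars.isdigit <:+ c :: t :=
      (List.dropWhile_suffix _).trans (List.suffix_cons c t)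
    have hsplit := List.takeWhile_append_dropWhile (p := PySem.Chars.isdigit) (l := t)
    rcases hr : t.dropWhile PySem.Chars.isdigit with _ | ⟨x, r2⟩
    · rw [hr, List.append_nil] at hsplit
      rw [← hsplit]
      have h0 := CubeWF.tok c (t.takeWhile PySem.Chars.isdigit) [] [] hc hds (Or.inl rfl) CubeWF.nil
      simpa using h0
    · rw [hr] at hsplit
      have hxmem : x ∈ c :: t := hsuffe.subset (by rw [hr]; simp)
      have hxnd : PySem.Chars.isdigit x = false := by
        have := List.head_dropWhile_not PySem.Chars.isdigit (l := t) (by rw [hr]; simp)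
        simpa [hr] using this
      have hxcl := h1 x hxmem
      have hlen : (x :: r2).length ≤ t.length := by
        have := (List.dropWhile_suffix (l := t) PySem.Chars.isdigit).length_le
        rw [hr] at this
        exact this
      by_cases hxa : PySem.Chars.isalpha x = true
      · rw [← hsplit]
        have hwrest : CubeWF (x :: r2) := by
          refine ih (x :: r2).length (by simp at hn hlen ⊢; omega) (x :: r2) ?_ ?_ ?_ rfl
          · intro y hy
            exact h1 y (hsuffe.subset (by rw [hr]; exact hy))
          · intro y hy
            simp only [List.head?_cons, Option.mem_def, Option.some.injEq] at hy
            subst hy; exact hxa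
          · exact h3.suffix (by rw [← hr]; exact hsuffe)
        have h0 := CubeWF.tok c (t.takeWhile PySem.Chars.isdigit) [] (x :: r2) hc hds (Or.inl rfl) hwrest
        simpa using h0
      · have hxp : x = '\'' := by
          rcases Bool.or_eq_true_iff.mp hxcl with h | h
          · rcases Bool.or_eq_true_iff.mp h with h | h
            · exact absurd h hxa
            · exact absurd h (by simp [hxnd])
          · exact eq_of_beq h
        subst hxp
        have hchain : List.IsChain (fun a b => (PySem.Chars.isdigit b || b == '\'') = true →
            (PySem.Chars.isalpha a || PySem.Chars.isdigit a) = true) ('\'' :: r2) :=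
          h3.suffix (by rw [← hr]; exact hsuffe)
        have hr2head : ∀ y ∈ r2.head?, PySem.Chars.isalpha y = true := by
          cases r2 with
          | nil => intro y hy; simp at hy
          | cons y0 u =>
            have hrel := (List.isChain_cons_cons.mp hchain).1
            have hycl := h1 y0 (hsuffe.subset (by rw [hr]; simp))
            have hy0 : PySem.Chars.isalpha y0 = true := by
              by_cases hyd : (PySem.Chars.isdigit y0 || y0 == '\'') = true
              · have := hrel hyd
                simp [prime_not_alpha, prime_not_digit] at this
              · rcases Bool.or_eq_true_iff.mp hycl with h | h
                · rcases Bool.or_eq_true_iff.mp h with h | h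
                  · exact h
                  · exact absurd (by simp [h]) hyd
                · exact absurd (by simp [h]) hyd
            intro y hy
            simp only [List.head?_cons, Option.mem_def, Option.some.injEq] at hy
            subst hy; exact hy0
        have hwrest : CubeWF r2 := by
          refine ih r2.length (by simp at hn hlen ⊢; omega) r2 ?_ hr2head ?_ rfl
          · intro y hy
            exact h1 y (hsuffe.subset (by rw [hr]; simp [hy]))
          · exact hchain.tail
        rw [← hsplit]
        have h0 := CubeWF.tok c (t.takeWhile PySem.Chars.isdigit) ['\''] r2 hc hds (Or.inr rfl) hwrest
        simpa using h0

-- A's loop abstracted over the literal list (early return on the first contradiction)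
def aRun : List (String × Bool) → PySem.Dict String Bool → PySem.Dict String Bool
  | [], d => d
  | (b, p) :: ls, d =>
    if d.contains b && !(d.get? b == some p) then PySem.Dict.empty.insert "__IMPOSSIBLE__" true
    else aRun ls (d.insert b p)

-- B's setdefault loop, generalized to any start dict (pbSeen lits = seenF PySem.Dict.empty lits)
def seenF (d : PySem.Dict String Bool) (ls : List (String × Bool)) : PySem.Dict String Bool :=
  ls.foldl (fun d bp => d.setdefault bp.1 bp.2) d

theorem seenF_get (ls : List (String × Bool)) (d : PySem.Dict String Bool) (k : String) (v : Bool)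
    (h : d.get? k = some v) : (seenF d ls).get? k = some v := by
  induction ls generalizing d with
  | nil => exact h
  | cons bp tl ih =>
    have hstep : (d.setdefault bp.1 bp.2).get? k = some v := by
      by_cases hcb : d.contains bp.1 = true
      · rw [PySem.Dict.setdefault_of_contains d bp.2 hcb]; exact h
      · rw [PySem.Dict.setdefault_of_not_contains d bp.2 (by simpa using hcb)]
        have hk : k ≠ bp.1 := by
          intro hk; subst hk
          rw [PySem.Dict.contains_eq_isSome_get?, h] at hcb
          simp at hcb
        rw [PySem.Dict.get?_insert_of_ne d bp.2 hk]; exact h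
    exact ih (d.setdefault bp.1 bp.2) hstep

theorem insert_same (d : PySem.Dict String Bool) (k : String) (v : Bool)
    (hnd : d.keys.Nodup) (h : d.get? k = some v) : d.insert k v = d := by
  apply PySem.Dict.ext
  have hcb : d.contains k = true := by
    rw [PySem.Dict.contains_eq_isSome_get?, h]; rfl
  rw [PySem.Dict.items_insert_of_contains d v hcb]
  have : ∀ p ∈ d.items, (if (p.1 == k) = true then (k, v) else p) = p := by
    intro p hp
    by_cases hpk : p.1 = k
    · have hget : d.get? p.1 = some p.2 := PySem.Dict.get?_of_mem_items d (by exact hp) hnd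
      rw [hpk, h] at hget
      have : p = (k, v) := by
        obtain ⟨p1, p2⟩ := p
        simp only at hpk
        simp only [Option.some.injEq] at hget
        simp [hpk, ← hget]
      simp [this]
    · simp [hpk]
  rw [List.map_congr_left this]
  simp

theorem aRun_seen (ls : List (String × Bool)) (d : PySem.Dict String Bool)
    (hnd : d.keys.Nodup) :
    aRun ls d = if ls.any (fun bp => !((seenF d ls).get? bp.1 == some bp.2)) then
      PySem.Dict.empty.insert "__IMPOSSIBLE__" true else seenF d ls := by
  induction ls generalizing d with
  | nil => simp [aRun, seenF]
  | cons bp tl ih =>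
    obtain ⟨b, p⟩ := bp
    have hfold : seenF d ((b, p) :: tl) = seenF (d.setdefault b p) tl := rfl
    by_cases hcb : d.contains b = true
    · obtain ⟨v, hv⟩ : ∃ v, d.get? b = some v := by
        rw [PySem.Dict.contains_eq_isSome_get?] at hcb
        exact Option.isSome_iff_exists.mp hcb
      have hsd : d.setdefault b p = d := PySem.Dict.setdefault_of_contains d p hcb
      have hseen : (seenF d tl).get? b = some v := seenF_get tl d b v hv
      by_cases hvp : v = p
      · subst hvp
        have hins : d.insert b v = d := insert_same d b v hnd hv
        rw [aRun]
        rw [if_neg (by simp [hv])]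
        rw [hins]
        rw [hfold, hsd]
        rw [List.any_cons]
        rw [show (!((seenF d tl).get? b == some v)) = false by simp [hseen]]
        simpa using ih d hnd
      · rw [aRun]
        rw [if_pos (by simp [hcb, hv, hvp])]
        rw [hfold, hsd, List.any_cons]
        rw [show (!((seenF d tl).get? b == some p)) = true by simp [hseen, hvp]]
        simp
    · rw [aRun]
      rw [if_neg (by simp [hcb])]
      have hsd : d.setdefault b p = d.insert b p :=
        PySem.Dict.setdefault_of_not_contains d p (by simpa using hcb)
      have hseen : (seenF (d.insert b p) tl).get? b = some p :=
        seenF_get tl (d.insert b p) b p (PySem.Dict.get?_insert_self d b p)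
      rw [hfold, hsd, List.any_cons]
      rw [show (!((seenF (d.insert b p) tl).get? b == some p)) = false by simp [hseen]]
      simpa using ih (d.insert b p) (PySem.Dict.nodup_keys_insert d b p hnd)

theorem pbLit_noprime (c : Char) (ds : List Char) (hc : PySem.Chars.isalpha c = true)
    (hds : ∀ d ∈ ds, PySem.Chars.isdigit d = true) :
    pbLit (c :: ds) = (String.ofList (c :: ds), true) := by
  unfold pbLit
  rw [endswith_tok_false c ds hc hds]
  have h1 := droprev_tok c ds hc hds
  simp only [h1]
  simp

theorem pbLit_prime (c : Char) (ds : List Char) (hc : PySem.Chars.isalpha c = true)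
    (hds : ∀ d ∈ ds, PySem.Chars.isdigit d = true) :
    pbLit (c :: (ds ++ ['\''])) = (String.ofList (c :: ds), false) := by
  unfold pbLit
  rw [endswith_tok_prime c ds]
  have h1 := droprev_tok_prime c ds hc hds
  simp only [h1]
  simp

theorem wf_pcScan (e : List Char) (h : CubeWF e) :
    ∀ d, pcScan e d = some (aRun ((gtoks e).map pbLit) d) := by
  induction h with
  | nil => intro d; simp [pcScan, gtoks, aRun]
  | tok c ds po rest hc hds hpo hrest ih =>
    intro d
    obtain ⟨htw, hdw⟩ := tw_dw_token ds (po ++ rest) hds (po_rest_head po rest hpo hrest)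
    rw [gtoks_step c ds po rest hds hpo hrest]
    rw [pcScan.eq_def]
    dsimp only
    rw [if_pos hc]
    simp only [htw, hdw]
    rcases hpo with rfl | rfl
    · -- no prime
      have hpr : (rest.head? = some '\'') = False := by
        rcases wf_head rest hrest with rfl | ⟨c', u, rfl, hc'⟩
        · simp
        · simp [alpha_ne_prime c' hc']
      simp only [List.nil_append, hpr, decide_false, Bool.false_eq_true, if_false,
        List.append_nil]
      rw [pcNormalize_noprime c ds hc hds]
      dsimp only
      rw [List.map_cons, pbLit_noprime c ds hc hds]
      rw [aRun]
      rw [apply_ite some]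
      split_ifs with hC
      · rfl
      · exact ih (d.insert (String.ofList (c :: ds)) true)
    · -- prime
      simp only [List.cons_append, List.nil_append, List.head?_cons, List.tail_cons]
      simp only [decide_true, if_true]
      rw [show (ds ++ ['\'']) ++ ['\''] = ds ++ ['\'', '\''] from by simp]
      rw [pcNormalize_prime c ds hc hds]
      dsimp only
      rw [List.map_cons, pbLit_prime c ds hc hds]
      rw [aRun]
      rw [apply_ite some]
      split_ifs with hC
      · rfl
      · exact ih (d.insert (String.ofList (c :: ds)) false)

-- every well-formed token passes B's shape validation
theorem wf_valid (e : List Char) (h : CubeWF e) :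
    ∀ t ∈ gtoks e, pbBadChar t = none := by
  induction h with
  | nil => intro t ht; simp [gtoks] at ht
  | tok c ds po rest hc hds hpo hrest ih =>
    intro t ht
    rw [gtoks_step c ds po rest hds hpo hrest] at ht
    rcases List.mem_cons.mp ht with rfl | ht
    · unfold pbBadChar
      obtain ⟨htw, hdw⟩ := tw_dw_token ds po hds (by
        rcases hpo with rfl | rfl
        · simp
        · intro x hx
          simp only [List.head?_cons, Option.mem_def, Option.some.injEq] at hx
          subst hx; exact prime_not_digit)
      simp only [List.drop_one, List.tail_cons, hdw]
      rcases hpo with rfl | rfl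
      · rfl
      · rfl
    · exact ih t ht

-- letter-cut positions: the Int-level port equals a Nat-level recursion

def natCuts : List Char → List Nat
  | [] => []
  | c :: u => if PySem.Chars.isalpha c then 0 :: (natCuts u).map (· + 1) else (natCuts u).map (· + 1)

theorem cutsAux (u : List Char) (s : Int) :
    ((PySem.List.enumerate u s).filter (fun p => PySem.Chars.isalpha p.2)).map (·.1)
      = (((PySem.List.enumerate u 0).filter (fun p => PySem.Chars.isalpha p.2)).map (·.1)).map (· + s) := by
  induction u generalizing s with
  | nil => simp [PySem.List.enumerate]
  | cons c u ih =>
    rw [PySem.List.enumerate_cons, PySem.List.enumerate_cons]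
    rw [show (0 : Int) + 1 = 1 from rfl]
    by_cases hc : PySem.Chars.isalpha c = true
    · simp only [List.filter_cons, hc, if_true, List.map_cons]
      rw [ih (s + 1), ih 1]
      simp only [List.map_map]
      congr 1
      · omega
      · exact List.map_congr_left (fun x _ => by simp only [Function.comp_apply]; omega)
    · simp only [List.filter_cons, hc, Bool.false_eq_true, if_false]
      rw [ih (s + 1), ih 1]
      simp only [List.map_map]
      exact List.map_congr_left (fun x _ => by simp only [Function.comp_apply]; omega)

theorem natCuts_cons (c : Char) (u : List Char) :
    natCuts (c :: u) = if PySem.Chars.isalpha c then 0 :: (natCuts u).map (· + 1)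
      else (natCuts u).map (· + 1) := rfl

theorem pbCuts_eq (e : List Char) : pbCuts e = (natCuts e).map Int.ofNat := by
  induction e with
  | nil => simp [pbCuts, natCuts, PySem.List.enumerate]
  | cons c u ih =>
    have hstep : pbCuts (c :: u)
        = (if PySem.Chars.isalpha c then [(0 : Int)] else []) ++ (pbCuts u).map (· + 1) := by
      unfold pbCuts
      rw [PySem.List.enumerate_cons, show (0 : Int) + 1 = 1 from rfl]
      by_cases hc : PySem.Chars.isalpha c = true
      · simp only [List.filter_cons, hc, if_true, List.map_cons]
        rw [cutsAux u 1]
        simp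
      · simp only [List.filter_cons, hc, Bool.false_eq_true, if_false]
        rw [cutsAux u 1]
        simp
    rw [hstep, ih, natCuts_cons]
    by_cases hc : PySem.Chars.isalpha c = true
    · rw [if_pos hc, if_pos hc]
      simp only [List.map_cons, List.map_map, List.singleton_append]
      congr 1
    · rw [if_neg hc, if_neg hc]
      simp only [List.map_map, List.nil_append]
      exact List.map_congr_left (fun x _ => by
        simp only [Function.comp_apply]; simp [Int.ofNat_eq_natCast])

theorem natCuts_append (xs ys : List Char) :
    natCuts (xs ++ ys) = natCuts xs ++ (natCuts ys).map (· + xs.length) := by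
  induction xs with
  | nil => simp [natCuts]
  | cons c xs ih =>
    simp only [List.cons_append, natCuts_cons, ih, List.length_cons]
    by_cases hc : PySem.Chars.isalpha c = true
    · rw [if_pos hc, if_pos hc]
      simp only [List.map_append, List.map_map, List.cons_append, List.cons.injEq, true_and,
        List.append_cancel_left_eq]
      exact List.map_congr_left (fun x _ => by simp only [Function.comp_apply]; omega)
    · rw [if_neg hc, if_neg hc]
      simp only [List.map_append, List.map_map, List.append_cancel_left_eq]
      exact List.map_congr_left (fun x _ => by simp only [Function.comp_apply]; omega)

theorem natCuts_nil_of_no_alpha (u : List Char)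
    (h : ∀ x ∈ u, PySem.Chars.isalpha x = false) : natCuts u = [] := by
  induction u with
  | nil => rfl
  | cons c u ih =>
    rw [natCuts_cons, if_neg (by simp [h c (by simp)])]
    simp [ih (fun x hx => h x (by simp [hx]))]

-- the Nat-level mirror of pbTokens
def natTokens (e : List Char) : List (List Char) :=
  ((natCuts e).zip ((natCuts e).tail ++ [e.length])).map
    (fun ab => (e.drop ab.1).take (ab.2 - ab.1))

theorem pbTokens_eq (e : List Char) : pbTokens e = natTokens e := by
  unfold pbTokens natTokens
  rw [pbCuts_eq]
  have htail : ((natCuts e).map Int.ofNat).tail = (natCuts e).tail.map Int.ofNat := by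
    cases natCuts e <;> rfl
  rw [htail]
  rw [show ((natCuts e).tail.map Int.ofNat ++ [(e.length : Int)])
        = ((natCuts e).tail ++ [e.length]).map Int.ofNat from by simp [Int.ofNat_eq_natCast]]
  rw [List.zip_map, List.map_map]
  refine List.map_congr_left (fun ab _ => ?_)
  obtain ⟨a, b⟩ := ab
  simp only [Function.comp_apply, Prod.map_apply]
  have := PySem.List.slice_natCast (xs := e) (a := a) (b := b)
  simpa [Int.ofNat_eq_natCast] using this

-- for well-formed strings, B's cut-and-slice tokens are exactly the greedy tokens
theorem wf_tokens (e : List Char) (h : CubeWF e) : natTokens e = gtoks e := by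
  induction h with
  | nil => simp [natTokens, natCuts, gtoks]
  | tok c ds po rest hc hds hpo hrest ih =>
    rw [gtoks_step c ds po rest hds hpo hrest]
    have hassoc : c :: (ds ++ (po ++ rest)) = (c :: (ds ++ po)) ++ rest := by simp
    have hnoal : ∀ x ∈ ds ++ po, PySem.Chars.isalpha x = false := by
      intro x hx
      rcases List.mem_append.mp hx with hx | hx
      · exact digit_not_alpha x (hds x hx)
      · rcases hpo with rfl | rfl
        · simp at hx
        · simp only [List.mem_singleton] at hx
          subst hx; exact prime_not_alpha
    have hcuts : natCuts (c :: (ds ++ (po ++ rest)))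
        = 0 :: (natCuts rest).map (· + (c :: (ds ++ po)).length) := by
      rw [hassoc, natCuts_append, natCuts_cons, if_pos hc,
        natCuts_nil_of_no_alpha _ hnoal]
      rfl
    rcases wf_head rest hrest with rfl | ⟨c', u, rfl, hc'⟩
    · -- rest = []
      unfold natTokens
      rw [hcuts]
      simp only [natCuts, List.map_nil, List.tail_cons, List.nil_append]
      rw [hassoc]
      simp only [List.append_nil, List.zip_cons_cons, List.zip_nil_right, List.map_cons,
        List.map_nil, List.drop_zero, Nat.sub_zero, gtoks]
      rw [List.take_length]
    · -- rest = c' :: u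
      have hrcuts : natCuts (c' :: u) = 0 :: (natCuts u).map (· + 1) := by
        rw [natCuts_cons, if_pos hc']
      unfold natTokens
      rw [hcuts, hrcuts]
      simp only [List.map_cons, Nat.zero_add, List.tail_cons, List.cons_append,
        List.zip_cons_cons, List.map_cons, List.drop_zero, Nat.sub_zero]
      rw [hassoc, List.take_left]
      have h1 : ((c :: (ds ++ po)).length ::
            List.map (fun x => x + (c :: (ds ++ po)).length) (List.map (fun x => x + 1) (natCuts u)))
          = (0 :: List.map (fun x => x + 1) (natCuts u)).map (fun x => x + (c :: (ds ++ po)).length) := by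
        simp
      rw [h1]
      have h2 : List.map (fun x => x + (c :: (ds ++ po)).length) (List.map (fun x => x + 1) (natCuts u))
            ++ [((c :: (ds ++ po)) ++ c' :: u).length]
          = ((List.map (fun x => x + 1) (natCuts u)) ++ [(c' :: u).length]).map
              (fun x => x + (c :: (ds ++ po)).length) := by
        simp [List.length_append, Nat.add_comm]
        omega
      rw [h2, List.zip_map, List.map_map]
      have hrt : gtoks (c' :: u) = ((0 :: List.map (fun x => x + 1) (natCuts u)).zip
            ((List.map (fun x => x + 1) (natCuts u)) ++ [(c' :: u).length])).map
            (fun ab => ((c' :: u).drop ab.1).take (ab.2 - ab.1)) := by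
        rw [← ih]
        unfold natTokens
        simp [hrcuts]
      rw [hrt]
      congr 1
      refine List.map_congr_left (fun ab _ => ?_)
      obtain ⟨a, b⟩ := ab
      simp only [Function.comp_apply, Prod.map_apply]
      have hdrop : List.drop (a + (c :: (ds ++ po)).length) ((c :: (ds ++ po)) ++ c' :: u)
          = List.drop a (c' :: u) := by
        rw [List.drop_append]
        rw [List.drop_eq_nil_of_le (by omega)]
        simp
      rw [hdrop, Nat.add_sub_add_right]

theorem isChain_of_zip (R : Char → Char → Prop) :
    ∀ e : List Char, (∀ p ∈ e.zip e.tail, R p.1 p.2) → List.IsChain R e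
  | [], _ => by simp
  | [a], _ => by simp
  | a :: b :: t, h =>
    List.isChain_cons_cons.mpr
      ⟨h (a, b) (by simp), isChain_of_zip R (b :: t) (fun p hp => h p (by simp; exact Or.inr (by simpa using hp)))⟩

theorem parse_cube_spec : Claim_equal_parse_cube := by
  intro expr _ hpre
  unfold Spec_parse_cube parse_cube parse_cube_alt
  unfold Pre_parse_cube at hpre
  dsimp only at hpre ⊢
  set e := PySem.Chars.replace (PySem.Chars.strip expr.toList) [' '] [] with he
  clear_value e
  by_cases h0 : e = [] ∨ e = ['1']
  · rw [if_pos h0, if_pos h0]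
  · rw [if_neg h0, if_neg h0]
    by_cases h1 : e = ['0']
    · rw [if_pos h1, if_pos h1]
    · rw [if_neg h1, if_neg h1]
      have hcond : e.all (fun c => PySem.Chars.isalpha c || PySem.Chars.isdigit c || c == '\'') = true ∧
          (e.take 1).all (fun c => PySem.Chars.isalpha c) = true ∧
          (e.zip e.tail).all (fun p => !(PySem.Chars.isdigit p.2 || p.2 == '\'') ||
            (PySem.Chars.isalpha p.1 || PySem.Chars.isdigit p.1)) = true := by
        rcases hpre with h | h | h | h
        · exact absurd (Or.inl h) h0
        · exact absurd (Or.inr h) h0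
        · exact absurd h h1
        · exact h
      obtain ⟨hclassB, hheadB, hchainB⟩ := hcond
      have hclass : ∀ c ∈ e, (PySem.Chars.isalpha c || PySem.Chars.isdigit c || c == '\'') = true := by
        simpa [List.all_eq_true] using hclassB
      have hhead : ∀ c ∈ e.head?, PySem.Chars.isalpha c = true := by
        intro c hc
        cases e with
        | nil => simp at hc
        | cons a u =>
          simp only [List.head?_cons, Option.mem_def, Option.some.injEq] at hc
          subst hc
          simpa [List.all_eq_true] using hheadB
      have hchain : List.IsChain (fun a b => (PySem.Chars.isdigit b || b == '\'') = true →
          (PySem.Chars.isalpha a || PySem.Chars.isdigit a) = true) e := by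
        refine isChain_of_zip _ e (fun p hp hX => ?_)
        have := (List.all_eq_true.mp hchainB) p hp
        rw [hX] at this
        simpa using this
      have hwf : CubeWF e := pre_wf e hclass hhead hchain
      have hene : e ≠ [] := fun h => h0 (Or.inl h)
      obtain ⟨c0, u0, heq, hc0⟩ := (wf_head e hwf).resolve_left hene
      have hch : (pbCuts e).head? = some 0 := by
        rw [pbCuts_eq, heq, natCuts_cons, if_pos hc0]
        simp
      rw [if_neg (by simp [hch])]
      have htoks : pbTokens e = gtoks e := by rw [pbTokens_eq, wf_tokens e hwf]
      have hany : ((pbTokens e).any (fun t => (pbBadChar t).isSome)) = false := by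
        rw [htoks]
        simp only [List.any_eq_false]
        intro t ht
        simp [wf_valid e hwf t ht]
      rw [if_neg (by simp [hany])]
      rw [wf_pcScan e hwf PySem.Dict.empty]
      dsimp only
      rw [htoks]
      have hSeen : pbSeen ((gtoks e).map pbLit) = seenF PySem.Dict.empty ((gtoks e).map pbLit) := rfl
      rw [hSeen, aRun_seen ((gtoks e).map pbLit) PySem.Dict.empty PySem.Dict.nodup_keys_empty]
      split_ifs with hC
      · rfl
      · rfl
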